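-- pv_equiv track=rewrite | github.com/nordeim/Medical-AI-Assistant | scale/success/retention/churn_prediction.py | calculate_risk_distribution
-- ===== SOURCE A (Python) =====
-- from typing import Dict, List, Any, Optional, Tuple
--
-- def calculate_risk_distribution(predictions: List[Dict[str, Any]]) -> Dict[str, int]:
--     """Calculate distribution of risk categories"""
--     distribution = {
--         "high_risk": 0,
--         "medium_risk": 0,
--         "low_risk": 0,
--         "minimal_risk": 0,
--         "unknown": 0
--     }
--
--     for prediction in predictions:
--         risk_category = prediction.get("risk_category", "unknown")
--         if risk_category in distribution:
--             distribution[risk_category] += 1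
--         else:
--             distribution["unknown"] += 1
--
--     return distribution
-- ===== SOURCE B (Python) =====
-- from typing import Dict, List, Any, Optional, Tuple
--
-- def calculate_risk_distribution(predictions: List[Dict[str, Any]]) -> Dict[str, int]:
--     """Calculate distribution of risk categories"""
--     cats = [p.get("risk_category", "unknown") for p in predictions]
--     named = ["high_risk", "medium_risk", "low_risk", "minimal_risk"]
--     distribution = {k: cats.count(k) for k in named}
--     distribution["unknown"] = len(cats) - sum(distribution.values())
--     return distribution
-- ===== Notes on version B (the rewrite author's own statement) =====
-- stated objective: idiomatic
-- what changed: Instead of A's single pass that tests each category against the five-key dict and bumps a bucket, B extracts the category list once, fills the four named buckets with list.count, and derives 'unknown' arithmetically as len minus the named counts.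
import Mathlib
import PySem

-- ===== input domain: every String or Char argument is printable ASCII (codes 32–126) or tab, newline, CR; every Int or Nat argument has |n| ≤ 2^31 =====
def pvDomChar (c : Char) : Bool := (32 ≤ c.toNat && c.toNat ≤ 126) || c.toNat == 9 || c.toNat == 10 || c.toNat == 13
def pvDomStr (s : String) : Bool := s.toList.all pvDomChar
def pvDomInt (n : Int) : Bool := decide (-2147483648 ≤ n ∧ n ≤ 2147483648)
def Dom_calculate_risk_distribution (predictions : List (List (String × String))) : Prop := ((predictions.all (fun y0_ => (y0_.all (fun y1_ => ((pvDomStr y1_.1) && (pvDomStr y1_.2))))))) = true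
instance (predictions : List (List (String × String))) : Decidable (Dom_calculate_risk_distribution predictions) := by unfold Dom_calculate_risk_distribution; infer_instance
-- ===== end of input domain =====

-- B replaces A's single-pass branch-and-bump over a five-key dict by counting the four named
-- categories directly and deriving 'unknown' by subtraction (objective: idiomatic).


-- ===== PORT A =====
def calculate_risk_distribution (predictions : List (List (String × String))) : List (String × Int) :=
  let distribution : PySem.Dict String Int :=
    PySem.Dict.ofList [("high_risk", 0), ("medium_risk", 0), ("low_risk", 0), ("minimal_risk", 0), ("unknown", 0)]
  (predictions.foldl (fun d prediction =>
      let risk_category := (PySem.Dict.mk prediction).getD "risk_category" "unknown"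
      if d.contains risk_category then d.insert risk_category (d.getD risk_category 0 + 1)
      else d.insert "unknown" (d.getD "unknown" 0 + 1)) distribution).items

-- ===== PORT B =====
def calculate_risk_distribution_alt (predictions : List (List (String × String))) : List (String × Int) :=
  let cats := predictions.map (fun p => (PySem.Dict.mk p).getD "risk_category" "unknown")
  let named := ["high_risk", "medium_risk", "low_risk", "minimal_risk"]
  let distribution := named.map (fun k => (k, (cats.count k : Int)))
  distribution ++ [("unknown", (cats.length : Int) - (distribution.map (·.2)).sum)]

-- ===== PRECONDITION & SPEC =====
def Spec_calculate_risk_distribution (predictions : List (List (String × String))) (out : List (String × Int)) : Prop := out = calculate_risk_distribution_alt predictions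
instance (predictions : List (List (String × String))) (out : List (String × Int)) : Decidable (Spec_calculate_risk_distribution predictions out) := by unfold Spec_calculate_risk_distribution; infer_instance

-- ===== CLAIM (what is proved, stated in full; the proofs are below) =====
def Claim_equal_calculate_risk_distribution : Prop := ∀ (predictions : List (List (String × String))), Dom_calculate_risk_distribution predictions → Spec_calculate_risk_distribution predictions (calculate_risk_distribution predictions)

-- ===== LEMMAS AND PROOFS =====

-- A's loop over the already-extracted category list, with generalized bucket contents.
theorem foldA_items (l : List String) (a b c d e : Int) :
    (l.foldl (fun d rc =>
        if d.contains rc then d.insert rc (d.getD rc 0 + 1)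
        else d.insert "unknown" (d.getD "unknown" 0 + 1))
      (PySem.Dict.mk [("high_risk", a), ("medium_risk", b), ("low_risk", c), ("minimal_risk", d), ("unknown", e)])).items
    = [("high_risk", a + l.count "high_risk"), ("medium_risk", b + l.count "medium_risk"),
       ("low_risk", c + l.count "low_risk"), ("minimal_risk", d + l.count "minimal_risk"),
       ("unknown", e + l.length - l.count "high_risk" - l.count "medium_risk" - l.count "low_risk" - l.count "minimal_risk")] := by
  induction l generalizing a b c d e with
  | nil => simp
  | cons x t ih =>
    rw [List.foldl_cons]
    by_cases h1 : x = "high_risk"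
    · subst h1
      refine ((ih (a + 1) b c d e).trans ?_)
      simp; omega
    by_cases h2 : x = "medium_risk"
    · subst h2
      refine ((ih a (b + 1) c d e).trans ?_)
      simp; omega
    by_cases h3 : x = "low_risk"
    · subst h3
      refine ((ih a b (c + 1) d e).trans ?_)
      simp; omega
    by_cases h4 : x = "minimal_risk"
    · subst h4
      refine ((ih a b c (d + 1) e).trans ?_)
      simp; omega
    by_cases h5 : x = "unknown"
    · subst h5
      refine ((ih a b c d (e + 1)).trans ?_)
      simp; omega
    · rw [if_neg (by rw [PySem.Dict.contains_mk]; simp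
                     exact ⟨Ne.symm h1, Ne.symm h2, Ne.symm h3, Ne.symm h4, Ne.symm h5⟩)]
      refine ((ih a b c d (e + 1)).trans ?_)
      simp [h1, h2, h3, h4]; omega

-- ===== VERDICT (by name: the statement is the Claim_ definition above) =====
theorem calculate_risk_distribution_spec : Claim_equal_calculate_risk_distribution := by
  intro predictions _
  unfold Spec_calculate_risk_distribution calculate_risk_distribution calculate_risk_distribution_alt
  simp only []
  rw [← List.foldl_map (f := fun (p : List (String × String)) => (PySem.Dict.mk p).getD "risk_category" "unknown")
      (g := fun (d : PySem.Dict String Int) rc =>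
        if d.contains rc then d.insert rc (d.getD rc 0 + 1)
        else d.insert "unknown" (d.getD "unknown" 0 + 1)) (l := predictions)]
  rw [show (PySem.Dict.ofList [("high_risk", (0:Int)), ("medium_risk", 0), ("low_risk", 0), ("minimal_risk", 0), ("unknown", 0)])
      = PySem.Dict.mk [("high_risk", 0), ("medium_risk", 0), ("low_risk", 0), ("minimal_risk", 0), ("unknown", 0)] from rfl,
      foldA_items]
  simp
  ring
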